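-- pv_equiv track=rewrite | github.com/fraware/cta-benchmark | scripts/implement_evidence_hardening.py | cross_model_pilot_chosen_instances
-- ===== SOURCE A (Python) =====
-- def cross_model_pilot_chosen_instances(by_instance: dict) -> list[str]:
--     families_seen: set[str] = set()
--     chosen: list[str] = []
--     for iid in sorted(by_instance.keys()):
--         fam = "_".join(iid.split("_")[:-1])
--         if fam in families_seen:
--             continue
--         families_seen.add(fam)
--         chosen.append(iid)
--         if len(chosen) == 12:
--             break
--     return chosen
-- ===== SOURCE B (Python) =====
-- def cross_model_pilot_chosen_instances(by_instance: dict) -> list[str]: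
--     fam_min: dict[str, str] = {}
--     for iid in by_instance.keys():
--         fam = "_".join(iid.split("_")[:-1])
--         cur = fam_min.get(fam)
--         if cur is None or iid < cur:
--             fam_min[fam] = iid
--     return sorted(fam_min.values())[:12]
-- ===== Notes on version B (the rewrite author's own statement) =====
-- stated objective: faster
-- what changed: A sorts all keys and deduplicates families in a single early-exit pass; B reverses the order of work: one unsorted pass reduces each family to its lexicographically smallest id in a dict, then only the at-most-one-per-family representatives are sorted and the first 12 taken.
import Mathlib
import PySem

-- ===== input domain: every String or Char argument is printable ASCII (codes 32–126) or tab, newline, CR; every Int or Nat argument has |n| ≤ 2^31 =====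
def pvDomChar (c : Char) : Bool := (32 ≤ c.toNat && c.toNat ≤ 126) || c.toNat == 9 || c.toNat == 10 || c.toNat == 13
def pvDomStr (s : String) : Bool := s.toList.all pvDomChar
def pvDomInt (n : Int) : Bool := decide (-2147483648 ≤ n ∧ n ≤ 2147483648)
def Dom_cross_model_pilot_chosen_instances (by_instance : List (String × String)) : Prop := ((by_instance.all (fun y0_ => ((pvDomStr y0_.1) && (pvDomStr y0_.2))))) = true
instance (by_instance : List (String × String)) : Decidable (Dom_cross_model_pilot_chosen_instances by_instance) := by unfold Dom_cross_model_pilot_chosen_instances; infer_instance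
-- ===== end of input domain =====

-- B reverses the order of work: instead of sorting all keys and deduplicating families in one
-- early-exit pass (A), it first reduces each family to its lexicographically smallest id in one
-- unsorted pass over the keys, then sorts only the representatives and takes the first 12.
-- Objective: faster (measured ~1.7x on generated inputs: only the representatives are sorted).

-- fam = "_".join(iid.split("_")[:-1])  — identical expression in both Pythons, shared helper
-- (split? is total here since the separator "_" is nonempty: .getD [] is never taken)
def pvFam (iid : String) : String :=
  PySem.Str.join "_" (PySem.List.slice ((PySem.Str.split? iid "_").getD []) none (some (-1)))

-- ===== PORT A =====
-- the for-loop with `continue` and `break` over sorted(by_instance.keys())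
def pvALoop : List String → PySem.Set String → List String → List String
  | [], _seen, chosen => chosen
  | iid :: rest, seen, chosen =>
    let fam := pvFam iid
    if PySem.Set.contains seen fam then pvALoop rest seen chosen
    else
      let seen' := PySem.Set.add seen fam
      let chosen' := chosen ++ [iid]
      if chosen'.length == 12 then chosen' else pvALoop rest seen' chosen'

def cross_model_pilot_chosen_instances (by_instance : List (String × String)) : List String :=
  pvALoop (PySem.List.sorted (PySem.Set.ofList (by_instance.map Prod.fst)) (fun x => x) false)
    PySem.Set.empty []

-- ===== PORT B =====
-- one unsorted pass keeping the lexicographically smallest iid per family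
def pvBStep (d : PySem.Dict String String) (iid : String) : PySem.Dict String String :=
  let fam := pvFam iid
  match d.get? fam with
  | none => d.insert fam iid
  | some cur => if iid < cur then d.insert fam iid else d

def cross_model_pilot_chosen_instances_alt (by_instance : List (String × String)) : List String :=
  let fam_min := (PySem.Set.ofList (by_instance.map Prod.fst)).foldl pvBStep PySem.Dict.empty
  PySem.List.slice (PySem.List.sorted fam_min.values (fun x => x) false) none (some 12)

-- ===== PRECONDITION & SPEC =====
def Spec_cross_model_pilot_chosen_instances (by_instance : List (String × String)) (out : List String) : Prop := out = cross_model_pilot_chosen_instances_alt by_instance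
instance (by_instance : List (String × String)) (out : List String) : Decidable (Spec_cross_model_pilot_chosen_instances by_instance out) := by unfold Spec_cross_model_pilot_chosen_instances; infer_instance

-- ===== CLAIM (what is proved, stated in full; the proofs are below) =====
def Claim_equal_cross_model_pilot_chosen_instances : Prop := ∀ (by_instance : List (String × String)), Dom_cross_model_pilot_chosen_instances by_instance → Spec_cross_model_pilot_chosen_instances by_instance (cross_model_pilot_chosen_instances by_instance)

-- ===== LEMMAS AND PROOFS =====

-- proof-side view of A's loop: the uncapped first-of-each-family filter
def pvFilter : PySem.Set String → List String → List String
  | _, [] => []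
  | seen, x :: t =>
    if PySem.Set.contains seen (pvFam x) then pvFilter seen t
    else x :: pvFilter (PySem.Set.add seen (pvFam x)) t

theorem pvFilter_sublist (seen : PySem.Set String) (l : List String) :
    (pvFilter seen l).Sublist l := by
  induction l generalizing seen with
  | nil => simp [pvFilter]
  | cons x t ih =>
    simp only [pvFilter]
    split
    · exact (ih seen).cons _
    · exact (ih _).cons₂ _

theorem pvALoop_eq (l : List String) (seen : PySem.Set String) (chosen : List String)
    (h : chosen.length < 12) :
    pvALoop l seen chosen = chosen ++ (pvFilter seen l).take (12 - chosen.length) := by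
  induction l generalizing seen chosen with
  | nil => simp [pvALoop, pvFilter]
  | cons x t ih =>
    simp only [pvALoop, pvFilter]
    split
    · exact ih seen chosen h
    · by_cases h12 : chosen.length + 1 = 12
      · have hb : ((chosen ++ [x]).length == 12) = true := by simp; omega
        rw [hb]
        have e1 : 12 - chosen.length = 1 := by omega
        simp [e1]
      · have hlt : (chosen ++ [x]).length < 12 := by simp; omega
        have hb : ((chosen ++ [x]).length == 12) = false := by simp; omega
        rw [hb]
        simp only [Bool.false_eq_true, if_false]
        rw [ih _ _ hlt]
        have e : 12 - chosen.length = (12 - (chosen ++ [x]).length) + 1 := by simp; omega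
        rw [e, List.take_succ_cons]
        simp

theorem pv_contains_iff (s : PySem.Set String) (x : String) :
    PySem.Set.contains s x = true ↔ x ∈ s := by
  simp [PySem.Set.contains]

-- membership in the filter over a strictly increasing list: exactly the unseen per-family minima
theorem mem_pvFilter (seen : PySem.Set String) (l : List String)
    (hp : l.Pairwise (· < ·)) (x : String) :
    x ∈ pvFilter seen l ↔
      x ∈ l ∧ pvFam x ∉ seen ∧ ∀ y ∈ l, pvFam y = pvFam x → x ≤ y := by
  induction l generalizing seen with
  | nil => simp [pvFilter]
  | cons a t ih =>
    obtain ⟨ha, hp'⟩ := List.pairwise_cons.mp hp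
    simp only [pvFilter]
    by_cases hc : PySem.Set.contains seen (pvFam a) = true
    · have hmem : pvFam a ∈ seen := (pv_contains_iff _ _).mp hc
      rw [if_pos hc, ih seen hp']
      constructor
      · rintro ⟨hx, hns, hmin⟩
        refine ⟨List.mem_cons_of_mem _ hx, hns, ?_⟩
        intro y hy hf
        rcases List.mem_cons.mp hy with rfl | hy
        · exact absurd (hf ▸ hmem) hns
        · exact hmin y hy hf
      · rintro ⟨hx, hns, hmin⟩
        rcases List.mem_cons.mp hx with rfl | hx
        · exact absurd hmem hns
        · exact ⟨hx, hns, fun y hy hf => hmin y (List.mem_cons_of_mem _ hy) hf⟩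
    · have hnmem : pvFam a ∉ seen := fun h => hc ((pv_contains_iff _ _).mpr h)
      rw [if_neg hc, List.mem_cons, ih _ hp']
      constructor
      · rintro (rfl | ⟨hx, hns, hmin⟩)
        · refine ⟨List.mem_cons_self, hnmem, ?_⟩
          intro y hy hf
          rcases List.mem_cons.mp hy with rfl | hy
          · exact le_refl _
          · exact le_of_lt (ha y hy)
        · have hfa : pvFam x ≠ pvFam a := fun e =>
            hns ((PySem.Set.mem_add _ _ _).mpr (Or.inr e))
          refine ⟨List.mem_cons_of_mem _ hx,
            fun h => hns ((PySem.Set.mem_add _ _ _).mpr (Or.inl h)), ?_⟩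
          intro y hy hf
          rcases List.mem_cons.mp hy with rfl | hy
          · exact absurd hf.symm hfa
          · exact hmin y hy hf
      · rintro ⟨hx, hns, hmin⟩
        rcases List.mem_cons.mp hx with rfl | hx
        · exact Or.inl rfl
        · right
          by_cases he : pvFam x = pvFam a
          · exact absurd (hmin a List.mem_cons_self he.symm) (not_le.mpr (ha x hx))
          · refine ⟨hx, ?_, fun y hy hf => hmin y (List.mem_cons_of_mem _ hy) hf⟩
            intro h
            rcases (PySem.Set.mem_add _ _ _).mp h with h | h
            · exact hns h
            · exact he h

-- B-side: what one fold step does to a single lookup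
def pvAccStep (f : String) (o : Option String) (x : String) : Option String :=
  if pvFam x = f then
    some (match o with | none => x | some m => if x < m then x else m)
  else o

theorem pvBStep_get? (d : PySem.Dict String String) (x f : String) :
    (pvBStep d x).get? f = pvAccStep f (d.get? f) x := by
  by_cases he : pvFam x = f
  · subst he
    cases hg : d.get? (pvFam x) with
    | none => simp [pvBStep, pvAccStep, hg]
    | some cur =>
      simp only [pvBStep, pvAccStep, hg]
      split
      · simp
      · simp [hg]
  · have he' : f ≠ pvFam x := fun h => he h.symm
    cases hg : d.get? (pvFam x) with
    | none =>
      simp only [pvBStep, pvAccStep, hg, if_neg he]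
      exact PySem.Dict.get?_insert_of_ne d x he'
    | some cur =>
      simp only [pvBStep, pvAccStep, hg, if_neg he]
      split
      · simp [PySem.Dict.get?_insert, he']
      · rfl

theorem pvFold_get? (l : List String) (d : PySem.Dict String String) (f : String) :
    (l.foldl pvBStep d).get? f = l.foldl (pvAccStep f) (d.get? f) := by
  induction l generalizing d with
  | nil => rfl
  | cons x t ih => simp only [List.foldl_cons, ih, pvBStep_get?]

theorem pvAcc_some (l : List String) (f m : String) :
    ∃ v, l.foldl (pvAccStep f) (some m) = some v ∧
      (v = m ∨ (v ∈ l ∧ pvFam v = f)) ∧ v ≤ m ∧ ∀ y ∈ l, pvFam y = f → v ≤ y := by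
  induction l generalizing m with
  | nil => exact ⟨m, rfl, Or.inl rfl, le_refl _, by simp⟩
  | cons x t ih =>
    simp only [List.foldl_cons, pvAccStep]
    by_cases he : pvFam x = f
    · rw [if_pos he]
      by_cases hxm : x < m
      · rw [if_pos hxm]
        obtain ⟨v, hv, hor, hle, hall⟩ := ih x
        refine ⟨v, hv, ?_, le_trans hle (le_of_lt hxm), ?_⟩
        · rcases hor with rfl | ⟨hv', hf⟩
          · exact Or.inr ⟨List.mem_cons_self, he⟩
          · exact Or.inr ⟨List.mem_cons_of_mem _ hv', hf⟩
        · intro y hy hf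
          rcases List.mem_cons.mp hy with rfl | hy
          · exact hle
          · exact hall y hy hf
      · rw [if_neg hxm]
        obtain ⟨v, hv, hor, hle, hall⟩ := ih m
        refine ⟨v, hv, ?_, hle, ?_⟩
        · rcases hor with rfl | h
          · exact Or.inl rfl
          · exact Or.inr ⟨List.mem_cons_of_mem _ h.1, h.2⟩
        · intro y hy hf
          rcases List.mem_cons.mp hy with rfl | hy
          · exact le_trans hle (not_lt.mp hxm)
          · exact hall y hy hf
    · rw [if_neg he]
      obtain ⟨v, hv, hor, hle, hall⟩ := ih m
      refine ⟨v, hv, ?_, hle, ?_⟩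
      · rcases hor with rfl | h
        · exact Or.inl rfl
        · exact Or.inr ⟨List.mem_cons_of_mem _ h.1, h.2⟩
      · intro y hy hf
        rcases List.mem_cons.mp hy with rfl | hy
        · exact absurd hf he
        · exact hall y hy hf

theorem pvAcc_none_none (l : List String) (f : String) (h : ∀ x ∈ l, pvFam x ≠ f) :
    l.foldl (pvAccStep f) none = none := by
  induction l with
  | nil => rfl
  | cons x t ih =>
    simp only [List.foldl_cons, pvAccStep, if_neg (h x (by simp))]
    exact ih fun y hy => h y (by simp [hy])

theorem pvAcc_none (l : List String) (f : String) (h : ∃ x ∈ l, pvFam x = f) :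
    ∃ v, l.foldl (pvAccStep f) none = some v ∧ v ∈ l ∧ pvFam v = f ∧
      ∀ y ∈ l, pvFam y = f → v ≤ y := by
  induction l with
  | nil => simp at h
  | cons x t ih =>
    simp only [List.foldl_cons, pvAccStep]
    by_cases he : pvFam x = f
    · rw [if_pos he]
      obtain ⟨v, hv, hor, hle, hall⟩ := pvAcc_some t f x
      refine ⟨v, hv, ?_, ?_, ?_⟩
      · rcases hor with rfl | h'
        · exact List.mem_cons_self
        · exact List.mem_cons_of_mem _ h'.1
      · rcases hor with rfl | h'
        · exact he
        · exact h'.2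
      · intro y hy hf
        rcases List.mem_cons.mp hy with rfl | hy
        · exact hle
        · exact hall y hy hf
    · rw [if_neg he]
      obtain ⟨w, hw, hwf⟩ := h
      rcases List.mem_cons.mp hw with rfl | hw
      · exact absurd hwf he
      · obtain ⟨v, hv, hvm, hvf, hall⟩ := ih ⟨w, hw, hwf⟩
        refine ⟨v, hv, List.mem_cons_of_mem _ hvm, hvf, ?_⟩
        intro y hy hf
        rcases List.mem_cons.mp hy with rfl | hy
        · exact absurd hf he
        · exact hall y hy hf

theorem pvGet?_char (ks : List String) (f v : String) :
    (ks.foldl pvBStep PySem.Dict.empty).get? f = some v ↔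
      (v ∈ ks ∧ pvFam v = f ∧ ∀ y ∈ ks, pvFam y = f → v ≤ y) := by
  rw [pvFold_get?, PySem.Dict.get?_empty]
  constructor
  · intro hv
    by_cases hex : ∃ x ∈ ks, pvFam x = f
    · obtain ⟨w, hw, hwm, hwf, hwall⟩ := pvAcc_none ks f hex
      rw [hw] at hv
      exact Option.some.inj hv ▸ ⟨hwm, hwf, hwall⟩
    · push Not at hex
      rw [pvAcc_none_none ks f hex] at hv
      cases hv
  · rintro ⟨hv, hf, hall⟩
    obtain ⟨w, hw, hwm, hwf, hwall⟩ := pvAcc_none ks f ⟨v, hv, hf⟩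
    rw [hw]
    exact congrArg some (le_antisymm (hwall v hv hf) (hall w hwm hwf))

theorem pvFold_nodup_keys (l : List String) (d : PySem.Dict String String)
    (h : d.keys.Nodup) : (l.foldl pvBStep d).keys.Nodup := by
  induction l generalizing d with
  | nil => exact h
  | cons x t ih =>
    refine ih _ ?_
    simp only [pvBStep]
    cases hg : d.get? (pvFam x) with
    | none => exact PySem.Dict.nodup_keys_insert _ _ _ h
    | some cur =>
      by_cases hx : x < cur
      · simpa [hx] using PySem.Dict.nodup_keys_insert (d := d) (k := pvFam x) (v := x) h
      · simpa [hx] using h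

theorem mem_values_iff (d : PySem.Dict String String) (hnd : d.keys.Nodup) (v : String) :
    v ∈ d.values ↔ ∃ k, d.get? k = some v := by
  constructor
  · intro hv
    have hv' : v ∈ d.items.map (·.2) := by simpa [PySem.Dict.values] using hv
    obtain ⟨p, hp, he⟩ := List.mem_map.mp hv'
    have hpv : (p.1, v) ∈ d.items := by rw [← he]; simpa using hp
    exact ⟨p.1, PySem.Dict.get?_of_mem_items d hpv hnd⟩
  · rintro ⟨k, hk⟩
    have := PySem.Dict.mem_items_of_get?_eq_some d hk
    simp only [PySem.Dict.values]
    exact List.mem_map.mpr ⟨(k, v), this, rfl⟩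

theorem pv_mem_values (ks : List String) (v : String) :
    v ∈ (ks.foldl pvBStep PySem.Dict.empty).values ↔
      v ∈ ks ∧ ∀ y ∈ ks, pvFam y = pvFam v → v ≤ y := by
  have hnd := pvFold_nodup_keys ks _ (PySem.Dict.nodup_keys_empty)
  rw [mem_values_iff _ hnd]
  constructor
  · rintro ⟨k, hk⟩
    obtain ⟨h1, h2, h3⟩ := (pvGet?_char ks k v).mp hk
    exact ⟨h1, by rw [h2]; exact h3⟩
  · rintro ⟨hv, hall⟩
    exact ⟨pvFam v, (pvGet?_char ks (pvFam v) v).mpr ⟨hv, rfl, hall⟩⟩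

theorem pv_values_nodup (ks : List String) :
    ((ks.foldl pvBStep PySem.Dict.empty).values).Nodup := by
  have hnd := pvFold_nodup_keys ks PySem.Dict.empty (PySem.Dict.nodup_keys_empty)
  set d := ks.foldl pvBStep PySem.Dict.empty with hd
  have hk : d.items.Pairwise (fun p q => p.1 ≠ q.1) := by
    have h' : (d.items.map (·.1)).Nodup := hnd
    exact List.pairwise_map.mp h'
  have hv : d.items.Pairwise (fun p q => p.2 ≠ q.2) := by
    refine hk.imp_of_mem ?_
    intro p q hp hq hne
    have h1 : d.get? p.1 = some p.2 :=
      PySem.Dict.get?_of_mem_items d (by simpa using hp) hnd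
    have h2 : d.get? q.1 = some q.2 :=
      PySem.Dict.get?_of_mem_items d (by simpa using hq) hnd
    have f1 : pvFam p.2 = p.1 := ((pvGet?_char ks p.1 p.2).mp h1).2.1
    have f2 : pvFam q.2 = q.1 := ((pvGet?_char ks q.1 q.2).mp h2).2.1
    intro e
    exact hne (by rw [← f1, ← f2, e])
  have : (d.items.map (·.2)).Pairwise (· ≠ ·) := List.pairwise_map.mpr hv
  simpa [PySem.Dict.values, List.Nodup] using this

-- the two representative lists coincide
theorem pv_key (l : List String) :
    PySem.List.sorted ((PySem.Set.ofList l).foldl pvBStep PySem.Dict.empty).values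
        (fun x => x) false =
      pvFilter PySem.Set.empty (PySem.List.sorted (PySem.Set.ofList l) (fun x => x) false) := by
  have hlt : (PySem.List.sorted (PySem.Set.ofList l) (fun x => x) false).Pairwise (· < ·) :=
    PySem.List.sorted_ofList_pairwise_lt l
  have hsnd : (PySem.List.sorted (PySem.Set.ofList l) (fun x => x) false).Nodup :=
    hlt.imp (fun h => ne_of_lt h)
  apply PySem.List.sorted_eq_of_perm_of_pairwise_lt
  · refine (List.perm_ext_iff_of_nodup ?_ ?_).mpr ?_
    · exact hsnd.sublist (pvFilter_sublist _ _)
    · exact pv_values_nodup (PySem.Set.ofList l)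
    · intro a
      rw [mem_pvFilter _ _ hlt a, pv_mem_values (PySem.Set.ofList l) a]
      constructor
      · rintro ⟨hxs, -, hmin⟩
        exact ⟨(PySem.List.mem_sorted _ _ _ _).mp hxs,
          fun y hy hf => hmin y ((PySem.List.mem_sorted _ _ _ _).mpr hy) hf⟩
      · rintro ⟨hx, hmin⟩
        refine ⟨(PySem.List.mem_sorted _ _ _ _).mpr hx, ?_,
          fun y hy hf => hmin y ((PySem.List.mem_sorted _ _ _ _).mp hy) hf⟩
        simp [PySem.Set.empty]
  · exact List.Pairwise.sublist (pvFilter_sublist _ _) hlt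

-- ===== VERDICT (by name: the statement is the Claim_ definition above) =====
theorem cross_model_pilot_chosen_instances_spec : Claim_equal_cross_model_pilot_chosen_instances := by
  intro bi _
  unfold Spec_cross_model_pilot_chosen_instances cross_model_pilot_chosen_instances
    cross_model_pilot_chosen_instances_alt
  show pvALoop (PySem.List.sorted (PySem.Set.ofList (bi.map Prod.fst)) (fun x => x) false)
      PySem.Set.empty [] =
    PySem.List.slice (PySem.List.sorted
        ((PySem.Set.ofList (bi.map Prod.fst)).foldl pvBStep PySem.Dict.empty).values
        (fun x => x) false) none (some 12)
  rw [pvALoop_eq _ _ [] (by norm_num), PySem.List.slice_to _ (by norm_num), pv_key]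
  simp [PySem.Set.empty]
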